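-- pv_equiv track=rewrite | github.com/ViniBiajoni/reciprocity | UMs_to_Meds.py | filtra_ck_meds
-- ===== SOURCE A (Python) =====
-- def filtra_ck_meds(kmax, dct_ck_med):
--     for i in range(len(dct_ck_med)):
--         for ckmed in dct_ck_med[i]:
--             for k in range (i+1, len(dct_ck_med)):
--                 aux_list = list(dct_ck_med[k])
--                 for ckmed2 in aux_list:
--                     if set(ckmed).issubset(set(ckmed2)):
--                         dct_ck_med[k].remove(ckmed2)
--     return dct_ck_med
-- ===== SOURCE B (Python) =====
-- def filtra_ck_meds(kmax, dct_ck_med):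
--     # One forward pass: keep an element iff no survivor from a lower level is a subset of it.
--     # (A mutates the inner lists in place; B rebinds dct_ck_med[i] — return value is the same.)
--     survivors = []
--     for i in range(len(dct_ck_med)):
--         kept = [e for e in dct_ck_med[i]
--                 if not any(set(f).issubset(set(e)) for f in survivors)]
--         dct_ck_med[i] = kept
--         survivors.extend(kept)
--     return dct_ck_med
-- ===== Notes on version B (the rewrite author's own statement) =====
-- stated objective: simpler
-- what changed: Replaces A's triple-nested remove-scan over all higher levels by a single forward pass that keeps an accumulator of surviving lower-level elements and filters each level against it once.
import Mathlib
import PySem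

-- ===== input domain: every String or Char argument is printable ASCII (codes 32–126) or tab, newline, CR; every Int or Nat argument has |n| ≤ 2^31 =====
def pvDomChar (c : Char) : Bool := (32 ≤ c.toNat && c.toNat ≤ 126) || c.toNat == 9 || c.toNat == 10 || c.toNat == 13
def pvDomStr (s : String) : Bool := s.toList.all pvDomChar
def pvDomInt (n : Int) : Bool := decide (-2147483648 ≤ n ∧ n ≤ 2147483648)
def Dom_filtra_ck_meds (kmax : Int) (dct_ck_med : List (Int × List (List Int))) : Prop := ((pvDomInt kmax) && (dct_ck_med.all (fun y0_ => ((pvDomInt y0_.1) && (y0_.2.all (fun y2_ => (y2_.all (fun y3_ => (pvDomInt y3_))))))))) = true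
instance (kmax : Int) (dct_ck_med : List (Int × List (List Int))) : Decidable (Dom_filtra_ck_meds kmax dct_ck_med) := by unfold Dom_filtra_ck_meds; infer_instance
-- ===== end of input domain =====

-- B makes one forward pass with a survivors accumulator instead of A's nested remove-scans over all higher levels;
-- equivalence is about the RETURN value (A mutates the inner lists in place, B rebinds the dict entries).

-- ===== PORT A =====
-- shared helper: set(f).issubset(set(e))  (both Pythons contain this exact expression)
def pvSub (f e : List Int) : Bool := PySem.Set.issubset (PySem.Set.ofList f) (PySem.Set.ofList e)

-- 'aux_list = list(dct_ck_med[k]); for ckmed2 in aux_list: if subset: dct_ck_med[k].remove(ckmed2)'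
-- (live starts as dct_ck_med[k]; remove? never misses here, the .getD is an unreachable totalizer)
def pvRemoveLoop (ckmed : List Int) (live aux : List (List Int)) : List (List Int) :=
  aux.foldl (fun live ckmed2 =>
    if pvSub ckmed ckmed2 then ((PySem.List.remove? live ckmed2).getD live) else live) live

-- 'for k in range(i+1, len(dct_ck_med)): ...'
def pvKLoop (n i : Int) (ckmed : List Int) (d : PySem.Dict Int (List (List Int))) :
    PySem.Dict Int (List (List Int)) :=
  (PySem.List.pyRange (i + 1) n 1).foldl
    (fun d k => PySem.Dict.insert d k
      (pvRemoveLoop ckmed (PySem.Dict.getD d k []) (PySem.Dict.getD d k []))) d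

-- 'for ckmed in dct_ck_med[i]: ...'
def pvCkLoop (n i : Int) (d : PySem.Dict Int (List (List Int))) : PySem.Dict Int (List (List Int)) :=
  (PySem.Dict.getD d i []).foldl (fun d ckmed => pvKLoop n i ckmed d) d

def filtra_ck_meds (kmax : Int) (dct_ck_med : List (Int × List (List Int))) : List (Int × List (List Int)) :=
  ((PySem.List.pyRange 0 (dct_ck_med.length : Int) 1).foldl
    (fun d i => pvCkLoop (dct_ck_med.length : Int) i d) (PySem.Dict.mk dct_ck_med)).items

-- ===== PORT B =====
-- one level of B: filter by the accumulated survivors, rebind level i, extend survivors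
def pvLevelStep (st : PySem.Dict Int (List (List Int)) × List (List Int)) (i : Int) :
    PySem.Dict Int (List (List Int)) × List (List Int) :=
  let kept := (PySem.Dict.getD st.1 i []).filter (fun e => !(st.2.any (fun f => pvSub f e)))
  (PySem.Dict.insert st.1 i kept, st.2 ++ kept)

def filtra_ck_meds_alt (kmax : Int) (dct_ck_med : List (Int × List (List Int))) : List (Int × List (List Int)) :=
  (((PySem.List.pyRange 0 (dct_ck_med.length : Int) 1).foldl pvLevelStep
    (PySem.Dict.mk dct_ck_med, ([] : List (List Int)))).1).items

-- ===== PRECONDITION & SPEC =====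
-- Pre_ excludes assoc lists whose keys are not pairwise distinct (not a Python dict) or do not contain
-- every index 0..len-1 (there Python's dct_ck_med[i] raises KeyError, in A and in B alike).
def Pre_filtra_ck_meds (kmax : Int) (dct_ck_med : List (Int × List (List Int))) : Prop :=
  (dct_ck_med.map Prod.fst).Nodup ∧
    ∀ j ∈ List.range dct_ck_med.length, (j : Int) ∈ dct_ck_med.map Prod.fst
instance (kmax : Int) (dct_ck_med : List (Int × List (List Int))) : Decidable (Pre_filtra_ck_meds kmax dct_ck_med) := by unfold Pre_filtra_ck_meds; infer_instance

def pvWitness_filtra_ck_meds : Int × (List (Int × List (List Int))) :=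
  (3, [(0, [[1]]), (1, [[1, 2], [3]])])

def Spec_filtra_ck_meds (kmax : Int) (dct_ck_med : List (Int × List (List Int))) (out : List (Int × List (List Int))) : Prop := out = filtra_ck_meds_alt kmax dct_ck_med
instance (kmax : Int) (dct_ck_med : List (Int × List (List Int))) (out : List (Int × List (List Int))) : Decidable (Spec_filtra_ck_meds kmax dct_ck_med out) := by unfold Spec_filtra_ck_meds; infer_instance

-- ===== CLAIM (what is proved, stated in full; the proofs are below) =====
def Claim_equal_filtra_ck_meds : Prop := ∀ (kmax : Int) (dct_ck_med : List (Int × List (List Int))), Dom_filtra_ck_meds kmax dct_ck_med → Pre_filtra_ck_meds kmax dct_ck_med → Spec_filtra_ck_meds kmax dct_ck_med (filtra_ck_meds kmax dct_ck_med)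

-- ===== LEMMAS AND PROOFS =====

-- the common abstraction: filter out the elements that have a subset among S
def pvFilt (S l : List (List Int)) : List (List Int) :=
  l.filter (fun e => !(S.any (fun f => pvSub f e)))

def pvV (d0 : PySem.Dict Int (List (List Int))) (j : Nat) : List (List Int) :=
  PySem.Dict.getD d0 (j : Int) []

-- survivors of levels 0..i-1
def pvSurv (d0 : PySem.Dict Int (List (List Int))) : Nat → List (List Int)
  | 0 => []
  | i + 1 => pvSurv d0 i ++ pvFilt (pvSurv d0 i) (pvV d0 i)

def pvKept (d0 : PySem.Dict Int (List (List Int))) (i : Nat) : List (List Int) :=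
  pvFilt (pvSurv d0 i) (pvV d0 i)

theorem pvRemove_append (c2 : List Int) :
    ∀ (pre t : List (List Int)), (∀ x ∈ pre, x ≠ c2) →
      PySem.List.remove? (pre ++ c2 :: t) c2 = some (pre ++ t) := by
  intro pre t h
  induction pre with
  | nil => simp
  | cons x pre ih =>
      have hx : x ≠ c2 := h x (by simp)
      rw [List.cons_append, PySem.List.remove?_cons_of_ne _ hx,
        ih (fun y hy => h y (by simp [hy]))]
      simp

theorem pvRemoveLoop_filter (ck : List Int) :
    ∀ (t pre : List (List Int)), (∀ x ∈ pre, pvSub ck x = false) →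
      pvRemoveLoop ck (pre ++ t) t = pre ++ t.filter (fun c2 => !pvSub ck c2) := by
  intro t
  induction t with
  | nil => intro pre h; simp [pvRemoveLoop]
  | cons c2 t ih =>
      intro pre h
      simp only [pvRemoveLoop, List.foldl_cons] at *
      by_cases hc : pvSub ck c2 = true
      · have hne : ∀ x ∈ pre, x ≠ c2 := by
          intro x hx hxe; have := h x hx; rw [hxe] at this; simp [hc] at this
        rw [if_pos hc, pvRemove_append c2 pre t hne]
        simpa [hc] using ih pre h
      · rw [if_neg hc]
        have h2 : ∀ x ∈ pre ++ [c2], pvSub ck x = false := by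
          intro x hx
          rcases List.mem_append.1 hx with hx | hx
          · exact h x hx
          · simp at hx; subst hx; simpa using hc
        have hre : pre ++ c2 :: t = (pre ++ [c2]) ++ t := by simp
        rw [hre, ih (pre ++ [c2]) h2]
        simp [hc]

theorem pvRemoveLoop_self (ck : List Int) (aux : List (List Int)) :
    pvRemoveLoop ck aux aux = aux.filter (fun c2 => !pvSub ck c2) := by
  simpa using pvRemoveLoop_filter ck aux [] (by simp)

theorem pvFilt_comp (S C l : List (List Int)) :
    (pvFilt S l).filter (fun e => !(C.any (fun f => pvSub f e))) = pvFilt (S ++ C) l := by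
  simp only [pvFilt, List.filter_filter]
  exact List.filter_congr (by intro x hx; simp [List.any_append, Bool.and_comm])

theorem pvKLoop_spec (ck : List Int) (n : Int) :
    ∀ (m : Nat) (i : Int) (d : PySem.Dict Int (List (List Int))), (n - (i + 1)).toNat = m →
      (∀ k : Int, i + 1 ≤ k ∧ k < n → PySem.Dict.contains d k = true) →
      (∀ j : Int, PySem.Dict.getD (pvKLoop n i ck d) j [] =
        if i + 1 ≤ j ∧ j < n then (PySem.Dict.getD d j []).filter (fun c2 => !pvSub ck c2)
        else PySem.Dict.getD d j []) ∧
      (pvKLoop n i ck d).keys = d.keys := by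
  intro m
  induction m with
  | zero =>
      intro i d hm hc
      have hnb : n ≤ i + 1 := by omega
      refine ⟨fun j => ?_, ?_⟩
      · simp only [pvKLoop, PySem.List.pyRange_one_eq_nil hnb, List.foldl_nil]
        rw [if_neg (by omega)]
      · simp [pvKLoop, PySem.List.pyRange_one_eq_nil hnb]
  | succ m ih =>
      intro i d hm hc
      have hab : i + 1 < n := by omega
      have key : pvKLoop n i ck d = pvKLoop n (i + 1) ck
          (PySem.Dict.insert d (i + 1)
            ((PySem.Dict.getD d (i + 1) []).filter (fun c2 => !pvSub ck c2))) := by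
        simp only [pvKLoop]
        rw [PySem.List.pyRange_one_cons hab]
        simp only [List.foldl_cons, pvRemoveLoop_self]
      have hc' : ∀ k : Int, i + 1 + 1 ≤ k ∧ k < n →
          PySem.Dict.contains (PySem.Dict.insert d (i + 1)
            ((PySem.Dict.getD d (i + 1) []).filter (fun c2 => !pvSub ck c2))) k = true := by
        intro k hk
        rw [PySem.Dict.contains_insert]
        simp only [Bool.or_eq_true]
        exact Or.inr (hc k ⟨by omega, hk.2⟩)
      obtain ⟨hg, hk⟩ := ih (i + 1) _ (by omega) hc'
      refine ⟨fun j => ?_, ?_⟩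
      · rw [key, hg j]
        by_cases h1 : i + 1 + 1 ≤ j ∧ j < n
        · rw [if_pos h1, if_pos ⟨by omega, h1.2⟩, PySem.Dict.getD_insert, if_neg (by omega)]
        · rw [if_neg h1, PySem.Dict.getD_insert]
          by_cases h2 : j = i + 1
          · subst h2
            rw [if_pos rfl, if_pos ⟨le_refl _, hab⟩]
          · rw [if_neg h2, if_neg (by omega)]
      · rw [key, hk, PySem.Dict.keys_insert_of_contains _ _ (hc (i + 1) ⟨le_refl _, hab⟩)]

theorem pvCkFold_spec (n i : Int) :
    ∀ (C : List (List Int)) (d : PySem.Dict Int (List (List Int))),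
      (∀ k : Int, i + 1 ≤ k ∧ k < n → PySem.Dict.contains d k = true) →
      (∀ j : Int, PySem.Dict.getD (C.foldl (fun d ckmed => pvKLoop n i ckmed d) d) j [] =
        if i + 1 ≤ j ∧ j < n then (PySem.Dict.getD d j []).filter (fun e => !(C.any (fun f => pvSub f e)))
        else PySem.Dict.getD d j []) ∧
      (C.foldl (fun d ckmed => pvKLoop n i ckmed d) d).keys = d.keys := by
  intro C
  induction C with
  | nil =>
      intro d hc
      refine ⟨fun j => ?_, rfl⟩
      simp only [List.foldl_nil]
      split <;> simp
  | cons c C ih =>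
      intro d hc
      obtain ⟨hg1, hk1⟩ := pvKLoop_spec c n (n - (i + 1)).toNat i d rfl hc
      have hc' : ∀ k : Int, i + 1 ≤ k ∧ k < n →
          PySem.Dict.contains (pvKLoop n i c d) k = true := by
        intro k hk
        rw [PySem.Dict.contains_iff_mem_keys, hk1]
        exact (PySem.Dict.contains_iff_mem_keys _ _).1 (hc k hk)
      obtain ⟨hg2, hk2⟩ := ih (pvKLoop n i c d) hc'
      refine ⟨fun j => ?_, ?_⟩
      · simp only [List.foldl_cons]
        rw [hg2 j]
        by_cases h1 : i + 1 ≤ j ∧ j < n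
        · rw [if_pos h1, if_pos h1, hg1 j, if_pos h1, List.filter_filter]
          refine List.filter_congr ?_
          intro x hx
          simp only [List.any_cons, Bool.not_or]
          cases pvSub c x <;> simp
        · rw [if_neg h1, if_neg h1, hg1 j, if_neg h1]
      · simp only [List.foldl_cons]
        rw [hk2, hk1]

theorem pvOuterA (d0 : PySem.Dict Int (List (List Int))) (N : Nat)
    (hall : ∀ j : Nat, j < N → (j : Int) ∈ d0.keys) :
    ∀ m : Nat, m ≤ N →
      ((PySem.List.pyRange 0 (m : Int) 1).foldl (fun d i => pvCkLoop (N : Int) i d) d0).keys = d0.keys ∧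
      ∀ j : Nat, j < N →
        PySem.Dict.getD ((PySem.List.pyRange 0 (m : Int) 1).foldl (fun d i => pvCkLoop (N : Int) i d) d0) (j : Int) [] =
          if j < m then pvKept d0 j else pvFilt (pvSurv d0 m) (pvV d0 j) := by
  intro m
  induction m with
  | zero =>
      intro _
      refine ⟨by simp [PySem.List.pyRange_one_eq_nil], fun j hj => ?_⟩
      simp [PySem.List.pyRange_one_eq_nil, pvSurv, pvFilt, pvV]
  | succ m ih =>
      intro hm
      obtain ⟨hk, hg⟩ := ih (by omega)
      have hcast : ((m + 1 : Nat) : Int) = (m : Int) + 1 := by push_cast; ring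
      have hsplit : PySem.List.pyRange 0 ((m + 1 : Nat) : Int) 1 =
          PySem.List.pyRange 0 (m : Int) 1 ++ [(m : Int)] := by
        rw [hcast, PySem.List.pyRange_one_succ_right (by positivity)]
      rw [hsplit, List.foldl_append, List.foldl_cons, List.foldl_nil]
      set rm := (PySem.List.pyRange 0 (m : Int) 1).foldl (fun d i => pvCkLoop (N : Int) i d) d0 with hrm
      have hCm : PySem.Dict.getD rm (m : Int) [] = pvKept d0 m := by
        rw [hg m (by omega), if_neg (by omega)]
        rfl
      have hc : ∀ k : Int, (m : Int) + 1 ≤ k ∧ k < (N : Int) →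
          PySem.Dict.contains rm k = true := by
        intro k hkk
        rw [PySem.Dict.contains_iff_mem_keys, hk]
        have : k = ((k.toNat : Nat) : Int) := by omega
        rw [this]
        exact hall k.toNat (by omega)
      obtain ⟨hg2, hk2⟩ := pvCkFold_spec (N : Int) (m : Int)
        (PySem.Dict.getD rm (m : Int) []) rm hc
      constructor
      · show (pvCkLoop (N : Int) (m : Int) rm).keys = d0.keys
        unfold pvCkLoop
        rw [hk2, hk]
      · intro j hj
        show PySem.Dict.getD (pvCkLoop (N : Int) (m : Int) rm) (j : Int) [] = _
        unfold pvCkLoop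
        rw [hg2 (j : Int)]
        by_cases h1 : m + 1 ≤ j
        · rw [if_pos ⟨by omega, by omega⟩, hg j hj, if_neg (show ¬ j < m by omega), hCm,
            pvFilt_comp, if_neg (show ¬ j < m + 1 by omega)]
          rfl
        · rw [if_neg (show ¬ ((m : Int) + 1 ≤ (j : Int) ∧ (j : Int) < (N : Int)) by omega),
            hg j hj, if_pos (show j < m + 1 by omega)]
          by_cases h2 : j < m
          · rw [if_pos h2]
          · have hjm : j = m := by omega
            subst hjm
            rw [if_neg h2]
            rfl

theorem pvOuterB (d0 : PySem.Dict Int (List (List Int))) (N : Nat)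
    (hall : ∀ j : Nat, j < N → (j : Int) ∈ d0.keys) :
    ∀ m : Nat, m ≤ N →
      ((PySem.List.pyRange 0 (m : Int) 1).foldl pvLevelStep (d0, ([] : List (List Int)))).2 = pvSurv d0 m ∧
      ((PySem.List.pyRange 0 (m : Int) 1).foldl pvLevelStep (d0, ([] : List (List Int)))).1.keys = d0.keys ∧
      ∀ j : Nat, j < N →
        PySem.Dict.getD ((PySem.List.pyRange 0 (m : Int) 1).foldl pvLevelStep (d0, ([] : List (List Int)))).1 (j : Int) [] =
          if j < m then pvKept d0 j else pvV d0 j := by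
  intro m
  induction m with
  | zero =>
      intro _
      refine ⟨rfl, rfl, fun j hj => ?_⟩
      simp [PySem.List.pyRange_one_eq_nil, pvV]
  | succ m ih =>
      intro hm
      obtain ⟨hs, hk, hg⟩ := ih (by omega)
      have hcast : ((m + 1 : Nat) : Int) = (m : Int) + 1 := by push_cast; ring
      have hsplit : PySem.List.pyRange 0 ((m + 1 : Nat) : Int) 1 =
          PySem.List.pyRange 0 (m : Int) 1 ++ [(m : Int)] := by
        rw [hcast, PySem.List.pyRange_one_succ_right (by positivity)]
      rw [hsplit, List.foldl_append, List.foldl_cons, List.foldl_nil]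
      set st := (PySem.List.pyRange 0 (m : Int) 1).foldl pvLevelStep (d0, ([] : List (List Int))) with hst
      have hkept : (PySem.Dict.getD st.1 (m : Int) []).filter
          (fun e => !(st.2.any (fun f => pvSub f e))) = pvKept d0 m := by
        rw [hg m (by omega), if_neg (by omega), hs]
        rfl
      have hcont : PySem.Dict.contains st.1 (m : Int) = true := by
        rw [PySem.Dict.contains_iff_mem_keys, hk]
        exact hall m (by omega)
      refine ⟨?_, ?_, ?_⟩
      · show st.2 ++ _ = _
        rw [hkept, hs]
        rfl
      · show (PySem.Dict.insert st.1 (m : Int) _).keys = _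
        rw [hkept, PySem.Dict.keys_insert_of_contains _ _ hcont, hk]
      · intro j hj
        show PySem.Dict.getD (PySem.Dict.insert st.1 (m : Int) _) (j : Int) [] = _
        rw [hkept, PySem.Dict.getD_insert]
        by_cases h2 : (j : Int) = (m : Int)
        · have : j = m := by omega
          subst this
          rw [if_pos rfl, if_pos (by omega)]
        · rw [if_neg h2, hg j hj]
          by_cases h3 : j < m
          · rw [if_pos h3, if_pos (by omega)]
          · rw [if_neg h3, if_neg (by omega)]

theorem pvPigeon (keys : List Int) (N : Nat) (hlen : keys.length = N)
    (hall : ∀ j : Nat, j < N → (j : Int) ∈ keys) :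
    ∀ k ∈ keys, ∃ j : Nat, j < N ∧ k = (j : Int) := by
  have hLnd : ((List.range N).map (fun j : Nat => (j : Int))).Nodup :=
    List.Nodup.map (f := fun j : Nat => (j : Int))
      (fun a b h => by simpa using h) List.nodup_range
  have hsub : ((List.range N).map (fun j : Nat => (j : Int))) ⊆ keys := by
    intro x hx
    obtain ⟨j, hj, rfl⟩ := List.mem_map.1 hx
    exact hall j (List.mem_range.1 hj)
  have hperm : ((List.range N).map (fun j : Nat => (j : Int))).Perm keys :=
    (hLnd.subperm hsub).perm_of_length_le (by simp [hlen])
  intro k hk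
  have : k ∈ (List.range N).map (fun j : Nat => (j : Int)) := hperm.mem_iff.2 hk
  obtain ⟨j, hj, rfl⟩ := List.mem_map.1 this
  exact ⟨j, List.mem_range.1 hj, rfl⟩

-- ===== VERDICT (by name: the statement is the Claim_ definition above) =====
theorem filtra_ck_meds_spec : Claim_equal_filtra_ck_meds := by
  intro kmax dct _ hpre
  unfold Spec_filtra_ck_meds filtra_ck_meds filtra_ck_meds_alt
  obtain ⟨hnd0, hall0⟩ := hpre
  have hkeys0 : (PySem.Dict.mk dct).keys = dct.map Prod.fst := by
    simp [PySem.Dict.keys_mk]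
  have hnd : (PySem.Dict.mk dct).keys.Nodup := by rw [hkeys0]; exact hnd0
  have hlen : (PySem.Dict.mk dct).keys.length = dct.length := by
    rw [hkeys0]; simp
  have hall : ∀ j : Nat, j < dct.length → (j : Int) ∈ (PySem.Dict.mk dct).keys := by
    intro j hj
    rw [hkeys0]
    exact hall0 j (List.mem_range.2 hj)
  obtain ⟨hkA, hgA⟩ := pvOuterA (PySem.Dict.mk dct) dct.length hall dct.length (le_refl _)
  obtain ⟨-, hkB, hgB⟩ := pvOuterB (PySem.Dict.mk dct) dct.length hall dct.length (le_refl _)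
  rw [PySem.Dict.items_eq_map_keys _ (hkA ▸ hnd) ([] : List (List Int)),
    PySem.Dict.items_eq_map_keys _ (hkB ▸ hnd) ([] : List (List Int)), hkA, hkB]
  refine List.map_congr_left ?_
  intro k hkmem
  obtain ⟨j, hjN, rfl⟩ := pvPigeon (PySem.Dict.mk dct).keys dct.length hlen hall k hkmem
  rw [hgA j hjN, hgB j hjN, if_pos hjN, if_pos hjN]
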